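-- pv_equiv track=rewrite | github.com/jakobng/website1 | london-cinema-scrapers/generate_post.py | segment_listings
-- ===== SOURCE A (Python) =====
-- def segment_listings(listings: list[dict[str, str | None]], max_height: int, spacing: dict[str, int]) -> list[list[dict]]:
--     SEGMENTED_LISTS = []
--     current_segment = []
--     current_height = 0
--     for listing in listings:
--         required_height = spacing['title_line'] + spacing['time_line']
--         if current_height + required_height > max_height:
--             if current_segment:
--                 SEGMENTED_LISTS.append(current_segment)
--                 current_segment = [listing]
--                 current_height = required_height
--             else:
--                  SEGMENTED_LISTS.append([listing])
--                  current_height = 0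
--         else:
--             current_segment.append(listing)
--             current_height += required_height
--     if current_segment:
--         SEGMENTED_LISTS.append(current_segment)
--     return SEGMENTED_LISTS
-- ===== SOURCE B (Python) =====
-- def segment_listings(listings: list[dict[str, str | None]], max_height: int, spacing: dict[str, int]) -> list[list[dict]]:
--     # The per-listing height is loop-invariant, so the segmentation is determined
--     # up front: either every listing overflows on its own (singletons), or nothing
--     # ever overflows (one segment), or fixed-size chunks of capacity max_height // per.
--     if not listings:
--         return []
--     per = spacing['title_line'] + spacing['time_line']
--     if per > max_height:
--         return [[listing] for listing in listings]
--     if per <= 0: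
--         return [list(listings)]
--     n = max_height // per
--     out = []
--     rest = listings
--     while rest:
--         out.append(rest[:n])
--         rest = rest[n:]
--     return out
-- ===== Notes on version B (the rewrite author's own statement) =====
-- stated objective: simpler
-- what changed: Hoists the loop-invariant per-listing height out of the loop and replaces the running-height accumulator with a case analysis (all-singletons / one segment / fixed-size chunking by slicing), eliminating the overflow branch and height state.
import Mathlib
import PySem

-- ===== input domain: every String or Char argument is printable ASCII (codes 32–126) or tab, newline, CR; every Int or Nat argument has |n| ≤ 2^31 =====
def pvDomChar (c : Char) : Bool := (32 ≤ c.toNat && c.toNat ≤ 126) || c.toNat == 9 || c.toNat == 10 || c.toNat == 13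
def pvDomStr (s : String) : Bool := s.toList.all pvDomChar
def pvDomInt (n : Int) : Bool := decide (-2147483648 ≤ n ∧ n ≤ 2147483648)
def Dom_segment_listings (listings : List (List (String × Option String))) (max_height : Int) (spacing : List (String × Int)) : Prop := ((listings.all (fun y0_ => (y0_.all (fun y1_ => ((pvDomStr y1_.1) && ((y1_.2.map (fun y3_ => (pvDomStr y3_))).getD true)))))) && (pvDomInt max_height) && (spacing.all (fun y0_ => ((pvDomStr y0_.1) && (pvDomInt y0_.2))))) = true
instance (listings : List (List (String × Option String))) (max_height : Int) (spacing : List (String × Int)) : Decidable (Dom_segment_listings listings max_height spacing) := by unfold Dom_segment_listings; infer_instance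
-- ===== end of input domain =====

-- B hoists the loop-invariant per-listing height and replaces A's running-height
-- accumulator with a three-way case analysis (singletons / one segment / fixed-size
-- chunking); objective: simpler.

-- ===== PORT A =====
def segment_listings (listings : List (List (String × Option String))) (max_height : Int) (spacing : List (String × Int)) : List (List (List (String × Option String))) :=
  -- state: (SEGMENTED_LISTS, current_segment, current_height)
  let st := listings.foldl
    (fun (st : List (List (List (String × Option String))) × List (List (String × Option String)) × Int) listing =>
      -- spacing['title_line'] + spacing['time_line']; KeyError (missing key) is excluded by Pre_, default 0 is never used there
      let required_height := (PySem.Dict.mk spacing).getD "title_line" 0 + (PySem.Dict.mk spacing).getD "time_line" 0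
      if st.2.2 + required_height > max_height then
        if st.2.1 ≠ [] then (st.1 ++ [st.2.1], [listing], required_height)
        else (st.1 ++ [[listing]], st.2.1, (0 : Int))
      else (st.1, st.2.1 ++ [listing], st.2.2 + required_height))
    ([], [], 0)
  if st.2.1 ≠ [] then st.1 ++ [st.2.1] else st.1

-- ===== PORT B =====
-- the while loop 'while rest: out.append(rest[:n]); rest = rest[n:]' of Source B;
-- every call has n ≥ 1, where rest[:n] = take n and rest[n:] on (x :: xs) = xs.drop (n-1) — exact
def pvChunk {α : Type} (n : Nat) : List α → List (List α)
  | [] => []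
  | x :: xs => (x :: xs).take n :: pvChunk n (xs.drop (n - 1))
termination_by l => l.length
decreasing_by simp

def segment_listings_alt (listings : List (List (String × Option String))) (max_height : Int) (spacing : List (String × Int)) : List (List (List (String × Option String))) :=
  if listings = [] then []
  else
  let per := (PySem.Dict.mk spacing).getD "title_line" 0 + (PySem.Dict.mk spacing).getD "time_line" 0
  if per > max_height then listings.map (fun listing => [listing])
  else if per ≤ 0 then [listings]
  else pvChunk (PySem.Int.floordiv max_height per).toNat listings

-- ===== PRECONDITION & SPEC =====
-- Pre_ excludes exactly the inputs with nonempty listings and a spacing dict missing 'title_line' or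
-- 'time_line', on which Python A raises KeyError (with empty listings A never looks the keys up).
def Pre_segment_listings (listings : List (List (String × Option String))) (max_height : Int) (spacing : List (String × Int)) : Prop :=
  listings = [] ∨ (((PySem.Dict.mk spacing).get? "title_line").isSome = true ∧ ((PySem.Dict.mk spacing).get? "time_line").isSome = true)
instance (listings : List (List (String × Option String))) (max_height : Int) (spacing : List (String × Int)) : Decidable (Pre_segment_listings listings max_height spacing) := by unfold Pre_segment_listings; infer_instance

def pvWitness_segment_listings : (List (List (String × Option String))) × Int × (List (String × Int)) :=
  ([[("title", some "Film A")], [("title", none)], [("title", some "Film C")]], 4, [("title_line", 1), ("time_line", 1)])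

def Spec_segment_listings (listings : List (List (String × Option String))) (max_height : Int) (spacing : List (String × Int)) (out : List (List (List (String × Option String)))) : Prop := out = segment_listings_alt listings max_height spacing
instance (listings : List (List (String × Option String))) (max_height : Int) (spacing : List (String × Int)) (out : List (List (List (String × Option String)))) : Decidable (Spec_segment_listings listings max_height spacing out) := by unfold Spec_segment_listings; infer_instance

-- ===== CLAIM (what is proved, stated in full; the proofs are below) =====
def Claim_equal_segment_listings : Prop := ∀ (listings : List (List (String × Option String))) (max_height : Int) (spacing : List (String × Int)), Dom_segment_listings listings max_height spacing → Pre_segment_listings listings max_height spacing → Spec_segment_listings listings max_height spacing (segment_listings listings max_height spacing)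

-- ===== LEMMAS AND PROOFS =====

-- Abbreviations used only by the proofs.
abbrev pvItem : Type := List (String × Option String)
abbrev pvSt : Type := List (List pvItem) × List pvItem × Int
def pvStep (per mh : Int) (st : pvSt) (listing : pvItem) : pvSt :=
  if st.2.2 + per > mh then
    if st.2.1 ≠ [] then (st.1 ++ [st.2.1], [listing], per)
    else (st.1 ++ [[listing]], st.2.1, (0 : Int))
  else (st.1, st.2.1 ++ [listing], st.2.2 + per)
def pvWrap (st : pvSt) : List (List pvItem) :=
  if st.2.1 ≠ [] then st.1 ++ [st.2.1] else st.1

lemma pvFold_singleton (per mh : Int) (h : per > mh) :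
    ∀ (xs : List pvItem) (SEG : List (List pvItem)),
      xs.foldl (pvStep per mh) (SEG, [], 0) = (SEG ++ xs.map (fun l => [l]), [], 0) := by
  intro xs
  induction xs with
  | nil => intro SEG; simp
  | cons x xs ih =>
    intro SEG
    have hstep : pvStep per mh (SEG, [], 0) x = (SEG ++ [[x]], [], 0) := by
      simp [pvStep]; omega
    simp [List.foldl_cons, hstep, ih]

lemma pvFold_neg (per mh : Int) (hle : per ≤ mh) (hnp : per ≤ 0) :
    ∀ (xs acc : List pvItem) (SEG : List (List pvItem)) (h : Int), h ≤ 0 →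
      xs.foldl (pvStep per mh) (SEG, acc, h) = (SEG, acc ++ xs, h + xs.length * per) := by
  intro xs
  induction xs with
  | nil => intro acc SEG h _; simp
  | cons x xs ih =>
    intro acc SEG h hh
    have hstep : pvStep per mh (SEG, acc, h) x = (SEG, acc ++ [x], h + per) := by
      simp [pvStep]; omega
    rw [List.foldl_cons, hstep, ih (acc ++ [x]) SEG (h + per) (by omega)]
    have harr : acc ++ [x] ++ xs = acc ++ x :: xs := by simp
    have hint : h + per + (xs.length : Int) * per = h + ((x :: xs).length : Int) * per := by
      rw [List.length_cons]; push_cast; ring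
    rw [harr, hint]

lemma pvOverflow_iff (per mh : Int) (hp : 0 < per) (hle : per ≤ mh) (m : Nat) :
    ((m : Int) * per + per > mh ↔ (PySem.Int.floordiv mh per).toNat ≤ m) := by
  have hq1 : (1 : Int) ≤ PySem.Int.floordiv mh per := by
    rw [PySem.Int.le_floordiv_iff_mul_le hp]; omega
  have h2 : ((m : Int) + 1 ≤ PySem.Int.floordiv mh per ↔ ((m : Int) + 1) * per ≤ mh) :=
    PySem.Int.le_floordiv_iff_mul_le hp
  constructor
  · intro h
    have : ¬ ((m : Int) + 1 ≤ PySem.Int.floordiv mh per) := by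
      intro hc; have := h2.mp hc; nlinarith
    omega
  · intro h
    have : ¬ (((m : Int) + 1) * per ≤ mh) := by
      intro hc; have := h2.mpr hc; omega
    nlinarith

lemma pvFold_chunk (per mh : Int) (n : Nat) (hn1 : 1 ≤ n)
    (hov : ∀ m : Nat, ((m : Int) * per + per > mh ↔ n ≤ m)) :
    ∀ (xs : List pvItem) (SEG : List (List pvItem)) (cur : List pvItem),
      1 ≤ cur.length → cur.length ≤ n →
      pvWrap (xs.foldl (pvStep per mh) (SEG, cur, (cur.length : Int) * per))
        = SEG ++ pvChunk n (cur ++ xs) := by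
  intro xs
  induction xs with
  | nil =>
    intro SEG cur h1 h2
    have hne : cur ≠ [] := by intro hc; rw [hc] at h1; simp at h1
    have hch : pvChunk n cur = [cur] := by
      cases cur with
      | nil => exact absurd rfl hne
      | cons c cs =>
        have hdrop : cs.drop (n - 1) = [] := by
          apply List.drop_eq_nil_of_le; simp at h2 ⊢; omega
        have htake : (c :: cs).take n = c :: cs := by
          apply List.take_of_length_le; simpa using h2
        simp [pvChunk, hdrop, htake]
    simp [pvWrap, hne, hch]
  | cons x xs ih =>
    intro SEG cur h1 h2
    by_cases hfull : cur.length = n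
    · -- segment full: flush cur, start a new one with x
      have hcond : (cur.length : Int) * per + per > mh := by
        rw [hov]; omega
      have hne : cur ≠ [] := by intro hc; rw [hc] at h1; simp at h1
      have hstep : pvStep per mh (SEG, cur, (cur.length : Int) * per) x
          = (SEG ++ [cur], [x], per) := by
        simp [pvStep, hcond, hne]
      have h1x : ((([x] : List pvItem).length : Int) * per) = per := by simp
      have hrec := ih (SEG ++ [cur]) [x] (by simp) (by simpa using hn1)
      rw [h1x] at hrec
      rw [List.foldl_cons, hstep, hrec]
      have hrhs : pvChunk n (cur ++ x :: xs) = cur :: pvChunk n (x :: xs) := by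
        cases cur with
        | nil => exact absurd rfl hne
        | cons c cs =>
          have hlen : cs.length = n - 1 := by simp at hfull; omega
          have htake : (c :: (cs ++ x :: xs)).take n = c :: cs := by
            rw [show n = (c :: cs).length from hfull.symm]
            simp
          have hdrop : ((cs ++ x :: xs)).drop (n - 1) = x :: xs := by
            rw [show n - 1 = cs.length from hlen.symm]
            simp
          rw [show ((c :: cs) ++ x :: xs) = c :: (cs ++ x :: xs) from by simp]
          rw [pvChunk, htake, hdrop]
      rw [hrhs]; simp
    · -- room left: append x to the current segment
      have hcond : ¬ ((cur.length : Int) * per + per > mh) := by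
        rw [hov]; omega
      have hstep : pvStep per mh (SEG, cur, (cur.length : Int) * per) x
          = (SEG, cur ++ [x], ((cur ++ [x]).length : Int) * per) := by
        simp [pvStep, hcond]; ring
      rw [List.foldl_cons, hstep, ih SEG (cur ++ [x]) (by simp) (by simp; omega)]
      simp

-- ===== VERDICT (by name: the statement is the Claim_ definition above) =====
theorem segment_listings_spec : Claim_equal_segment_listings := by
  intro listings max_height spacing _ _
  unfold Spec_segment_listings segment_listings segment_listings_alt
  set per := (PySem.Dict.mk spacing).getD "title_line" 0 + (PySem.Dict.mk spacing).getD "time_line" 0 with hper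
  rcases Decidable.em (listings = []) with hnil | hnil
  · subst hnil; simp
  · rw [if_neg hnil]
    by_cases hbig : per > max_height
    · rw [if_pos hbig]
      show pvWrap (listings.foldl (pvStep per max_height) ([], [], 0))
          = listings.map (fun listing => [listing])
      rw [pvFold_singleton per max_height hbig listings []]
      simp [pvWrap]
    · rw [if_neg hbig]
      by_cases hneg : per ≤ 0
      · rw [if_pos hneg]
        show pvWrap (listings.foldl (pvStep per max_height) ([], [], 0)) = [listings]
        rw [pvFold_neg per max_height (by omega) hneg listings [] [] 0 (le_refl 0)]
        simp [pvWrap, hnil]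
      · rw [if_neg hneg]
        have hq1 : (1 : Int) ≤ PySem.Int.floordiv max_height per := by
          rw [PySem.Int.le_floordiv_iff_mul_le (by omega)]; omega
        have hn1 : 1 ≤ (PySem.Int.floordiv max_height per).toNat := by omega
        have hov := pvOverflow_iff per max_height (by omega) (by omega)
        cases listings with
        | nil => exact absurd rfl hnil
        | cons x xs =>
          show pvWrap ((x :: xs).foldl (pvStep per max_height) ([], [], 0))
              = pvChunk (PySem.Int.floordiv max_height per).toNat (x :: xs)
          have hfirst : pvStep per max_height ([], [], 0) x = ([], [x], per) := by
            simp [pvStep]; omega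
          have h1x : ((([x] : List pvItem).length : Int) * per) = per := by simp
          have h := pvFold_chunk per max_height (PySem.Int.floordiv max_height per).toNat
            hn1 hov xs [] [x] (by simp) (by simpa using hn1)
          rw [h1x] at h
          rw [List.foldl_cons, hfirst]
          simpa using h
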